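-- pv_equiv track=rewrite | github.com/SubhPB/leet-code | src/app/2026/contests/C489.py | almostPalindromic
-- ===== SOURCE A (Python) =====
-- def almostPalindromic(s: str) -> int:
--     n=len(s); dp=[[0]*(n+1) for _ in range(n+1)]
--     for i in range(1,n+1):
--         for j in range(n-1,-1,-1):
--             if s[i-1]==s[j]:
--                 dp[i][j]=1+dp[i-1][j+1]
--             else:
--                 dp[i][j]=max(dp[i-1][j],dp[i][j+1])
--     for i in range(1,n+1):
--         for j in range(n-1,-1,-1):
--             if s[i-1]==s[j]:
--                 dp[i][j]=1+dp[i-1][j+1]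
--
--     return min(n,1+dp[n][0])
-- ===== SOURCE B (Python) =====
-- def almostPalindromic(s: str) -> int:
--     # Interval DP over substrings: dp[i][j] = length of the longest palindromic
--     # subsequence of s[i..j], filled by increasing substring length; the answer
--     # is min(n, 1 + dp[0][n-1]).  (A's prefix-vs-reversed-suffix LCS table and
--     # its dead second pass compute the same quantity.)
--     n = len(s)
--     if n == 0:
--         return 0
--     dp = [[0] * n for _ in range(n)]
--     for i in range(n):
--         dp[i][i] = 1
--     for length in range(2, n + 1):
--         for i in range(n - length + 1):
--             j = i + length - 1
--             if s[i] == s[j]: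
--                 dp[i][j] = dp[i + 1][j - 1] + 2
--             else:
--                 dp[i][j] = max(dp[i + 1][j], dp[i][j - 1])
--     return min(n, 1 + dp[0][n - 1])
-- ===== Notes on version B (the rewrite author's own statement) =====
-- stated objective: alternative
-- what changed: A fills a prefix-vs-reversed-suffix LCS table and then runs a second, dead, rewrite pass; B uses the classic interval DP for the longest palindromic subsequence, dp[i][j] over substrings s[i..j] filled by increasing length, returning min(n, 1+dp[0][n-1]) - a different recurrence and traversal, correct because LCS(s, reversed(s)) equals the LPS length (proved in the Lean file).
import Mathlib
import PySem

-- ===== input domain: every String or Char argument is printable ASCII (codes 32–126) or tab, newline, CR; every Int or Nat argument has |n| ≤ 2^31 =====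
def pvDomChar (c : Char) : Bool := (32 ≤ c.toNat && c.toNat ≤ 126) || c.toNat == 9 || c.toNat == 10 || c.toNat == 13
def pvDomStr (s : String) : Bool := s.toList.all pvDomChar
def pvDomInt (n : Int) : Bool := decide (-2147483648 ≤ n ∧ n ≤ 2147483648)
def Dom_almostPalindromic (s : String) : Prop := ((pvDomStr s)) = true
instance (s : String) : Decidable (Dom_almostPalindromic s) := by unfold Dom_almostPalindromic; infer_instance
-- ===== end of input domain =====

-- B replaces A's prefix-vs-reversed-suffix LCS table (plus its dead second pass) by the classic
-- interval DP for the longest palindromic subsequence over substrings s[i..j] (alternative algorithm).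

-- ===== PORT A =====
-- shared low-level helpers: Python's xs[i] read and dp[i][j] = v write (indices are in range at every use)
def pvGetI (xs : List Int) (i : Int) : Int := (PySem.List.pyGet? xs i).getD 0
def pvRow (dp : List (List Int)) (i : Int) : List Int := (PySem.List.pyGet? dp i).getD []
def pvSet2 (dp : List (List Int)) (i j : Int) (v : Int) : List (List Int) :=
  PySem.List.pySetD dp i (PySem.List.pySetD (pvRow dp i) j v)

def almostPalindromic (s : String) : Int :=
  let cs := s.toList
  let n : Int := cs.length
  let dp : List (List Int) := List.replicate (cs.length + 1) (List.replicate (cs.length + 1) 0)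
  let dp := (PySem.List.pyRange 1 (n+1) 1).foldl (fun dp i =>
    (PySem.List.pyRange (n-1) (-1) (-1)).foldl (fun dp j =>
      if PySem.List.pyGet? cs (i-1) = PySem.List.pyGet? cs j then
        pvSet2 dp i j (1 + pvGetI (pvRow dp (i-1)) (j+1))
      else
        pvSet2 dp i j (max (pvGetI (pvRow dp (i-1)) j) (pvGetI (pvRow dp i) (j+1)))) dp) dp
  let dp := (PySem.List.pyRange 1 (n+1) 1).foldl (fun dp i =>
    (PySem.List.pyRange (n-1) (-1) (-1)).foldl (fun dp j =>
      if PySem.List.pyGet? cs (i-1) = PySem.List.pyGet? cs j then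
        pvSet2 dp i j (1 + pvGetI (pvRow dp (i-1)) (j+1))
      else dp) dp) dp
  min n (1 + pvGetI (pvRow dp n) 0)

-- ===== PORT B =====
def almostPalindromic_alt (s : String) : Int :=
  let cs := s.toList
  let n : Int := cs.length
  if n = 0 then 0
  else
    let dp : List (List Int) := List.replicate cs.length (List.replicate cs.length 0)
    let dp := (PySem.List.pyRange 0 n 1).foldl (fun dp i => pvSet2 dp i i 1) dp
    let dp := (PySem.List.pyRange 2 (n+1) 1).foldl (fun dp L =>
      (PySem.List.pyRange 0 (n - L + 1) 1).foldl (fun dp i =>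
        let j := i + L - 1
        if PySem.List.pyGet? cs i = PySem.List.pyGet? cs j then
          pvSet2 dp i j (pvGetI (pvRow dp (i+1)) (j-1) + 2)
        else
          pvSet2 dp i j (max (pvGetI (pvRow dp (i+1)) j) (pvGetI (pvRow dp i) (j-1)))) dp) dp
    min n (1 + pvGetI (pvRow dp 0) (n-1))

-- ===== PRECONDITION & SPEC =====
def Spec_almostPalindromic (s : String) (out : Int) : Prop := out = almostPalindromic_alt s
instance (s : String) (out : Int) : Decidable (Spec_almostPalindromic s out) := by unfold Spec_almostPalindromic; infer_instance

-- ===== CLAIM (what is proved, stated in full; the proofs are below) =====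
def Claim_equal_almostPalindromic : Prop := ∀ (s : String), Dom_almostPalindromic s → Spec_almostPalindromic s (almostPalindromic s)

-- ===== LEMMAS AND PROOFS =====

/-- Pure longest-common-subsequence length (front-consuming), Int-valued. -/
def lcsI : List Char → List Char → Int
  | [], _ => 0
  | _ :: _, [] => 0
  | a :: as, b :: bs =>
    if a = b then lcsI as bs + 1 else max (lcsI as (b :: bs)) (lcsI (a :: as) bs)
termination_by xs ys => xs.length + ys.length
decreasing_by all_goals (simp only [List.length_cons]; omega)

theorem lcsI_nil_right (xs : List Char) : lcsI xs [] = 0 := by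
  cases xs <;> simp [lcsI]

theorem lcsI_cons_cons (p q : Char) (ps qs : List Char) :
    lcsI (p :: ps) (q :: qs)
      = if p = q then lcsI ps qs + 1 else max (lcsI ps (q :: qs)) (lcsI (p :: ps) qs) := by
  rw [lcsI]

/-- A's table semantics: LCS of the reversed i-prefix of l and the suffix of l from j. -/
def specA (l : List Char) (i j : Nat) : Int := lcsI ((l.take i).reverse) (l.drop j)

theorem take_rev_cons (l : List Char) (i : Nat) (h1 : 1 ≤ i) (h2 : i ≤ l.length) :
    (l.take i).reverse = l[i-1]'(by omega) :: (l.take (i-1)).reverse := by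
  obtain ⟨k, rfl⟩ : ∃ k, i = k + 1 := ⟨i - 1, by omega⟩
  rw [List.take_succ, List.getElem?_eq_getElem (by omega)]
  simp

theorem specA_rec (l : List Char) (i m : Nat) (h1 : 1 ≤ i) (h2 : i ≤ l.length)
    (h3 : m < l.length) :
    specA l i m = if l[i-1]'(by omega) = l[m] then specA l (i-1) (m+1) + 1
      else max (specA l (i-1) m) (specA l i (m+1)) := by
  unfold specA
  rw [take_rev_cons l i h1 h2, List.drop_eq_getElem_cons h3, lcsI]

theorem specA_zero (l : List Char) (j : Nat) : specA l 0 j = 0 := by simp [specA, lcsI]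
theorem specA_len (l : List Char) (i : Nat) : specA l i l.length = 0 := by
  simp [specA, lcsI_nil_right]

-- generic loop lemmas ---------------------------------------------------------

theorem foldl_pyRange_up {σ : Type} (f : σ → Int → σ) (S : Nat → σ) (n : Nat)
    (h : ∀ i : Nat, 1 ≤ i → i ≤ n → f (S (i-1)) (i : Int) = S i) :
    (PySem.List.pyRange 1 ((n : Int)+1) 1).foldl f (S 0) = S n := by
  induction n with
  | zero => rw [PySem.List.pyRange_one_eq_nil (by omega)]; rfl
  | succ k ih =>
    have hsplit : PySem.List.pyRange 1 (((k+1 : Nat) : Int) + 1) 1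
        = PySem.List.pyRange 1 ((k : Int) + 1) 1 ++ [(k : Int) + 1] := by
      have := PySem.List.pyRange_one_succ_right (a := 1) (b := (k : Int) + 1) (by omega)
      push_cast
      push_cast at this
      exact this
    rw [hsplit, List.foldl_append, ih (fun i h1 h2 => h i h1 (by omega))]
    have := h (k+1) (by omega) (by omega)
    push_cast at this
    simpa using this

theorem foldl_pyRange_down {σ : Type} (f : σ → Int → σ) (S : Nat → σ) (n : Nat)
    (h : ∀ m : Nat, m < n → f (S (m+1)) (m : Int) = S m) :
    (PySem.List.pyRange ((n : Int) - 1) (-1) (-1)).foldl f (S n) = S 0 := by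
  induction n with
  | zero => rw [PySem.List.pyRange_neg_one_eq_nil (by omega)]; rfl
  | succ k ih =>
    have hcons : PySem.List.pyRange (((k+1 : Nat) : Int) - 1) (-1) (-1)
        = (k : Int) :: PySem.List.pyRange ((k : Int) - 1) (-1) (-1) := by
      have := PySem.List.pyRange_neg_one_cons (a := (k : Int)) (b := -1) (by omega)
      push_cast
      simpa using this
    rw [hcons, List.foldl_cons, h k (by omega), ih (fun m hm => h m (by omega))]

theorem foldl_fixed {σ : Type} (f : σ → Int → σ) (c : σ) :
    ∀ (L : List Int), (∀ x ∈ L, f c x = c) → L.foldl f c = c := by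
  intro L
  induction L with
  | nil => intro _; rfl
  | cons x xs ih =>
    intro h
    rw [List.foldl_cons, h x (by simp)]
    exact ih (fun y hy => h y (by simp [hy]))

/-- fold over range(a, a+n) with a state indexed by the loop counter. -/
theorem foldl_pyRange_from {σ : Type} (f : σ → Int → σ) (S : Nat → σ) (a : Int) (n : Nat)
    (h : ∀ i : Nat, i < n → f (S i) (a + i) = S (i+1)) :
    (PySem.List.pyRange a (a + (n : Int)) 1).foldl f (S 0) = S n := by
  induction n with
  | zero => rw [PySem.List.pyRange_one_eq_nil (by omega)]; rfl
  | succ k ih =>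
    have hsplit : PySem.List.pyRange a (a + ((k+1 : Nat) : Int)) 1
        = PySem.List.pyRange a (a + (k : Int)) 1 ++ [a + (k : Int)] := by
      have := PySem.List.pyRange_one_succ_right (a := a) (b := a + (k : Int)) (by omega)
      push_cast
      push_cast at this
      rw [show a + ((k : Int) + 1) = (a + (k : Int)) + 1 by ring]
      exact this
    rw [hsplit, List.foldl_append, ih (fun i hi => h i (by omega))]
    exact h k (by omega)

-- map-range list toolkit ------------------------------------------------------

theorem map_range_ext {α : Type} (k : Nat) (f g : Nat → α) (h : ∀ j, j < k → f j = g j) :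
    (List.range k).map f = (List.range k).map g := by
  apply List.map_congr_left
  intro j hj
  exact h j (List.mem_range.mp hj)

theorem pvGetI_map_range (k m : Nat) (f : Nat → Int) (hm : m < k) :
    pvGetI ((List.range k).map f) (m : Int) = f m := by
  simp [pvGetI, hm]

theorem pvRow_map_range (k m : Nat) (f : Nat → List Int) (hm : m < k) :
    pvRow ((List.range k).map f) (m : Int) = f m := by
  simp [pvRow, hm]

theorem pySetD_map_range {α : Type} (k m : Nat) (f : Nat → α) (v : α) (hm : m < k) :
    PySem.List.pySetD ((List.range k).map f) ((m : Nat) : Int) v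
      = (List.range k).map (fun j => if j = m then v else f j) := by
  have hlen : m < ((List.range k).map f).length := by simp [hm]
  unfold PySem.List.pySetD
  rw [PySem.List.pySet?_natCast _ _ _ hlen, Option.getD_some]
  apply List.ext_getElem (by simp)
  intro i h1 h2
  by_cases hi : i = m
  · subst hi; simp
  · simp [hi, Ne.symm hi]

theorem replicate_eq_map_range (k : Nat) (f : Nat → Int) (h : ∀ j, j < k → f j = 0) :
    List.replicate k (0 : Int) = (List.range k).map f := by
  apply List.ext_getElem (by simp)
  intro i h1 h2
  simp [h i (by simpa using h1)]

/-- generic 2D-table read. -/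
theorem read_table (N r c : Nat) (g : Nat → Nat → Int) (hr : r < N) (hc : c < N) :
    pvGetI (pvRow ((List.range N).map (fun r => (List.range N).map (g r))) (r : Int)) (c : Int)
      = g r c := by
  rw [pvRow_map_range _ _ _ hr, pvGetI_map_range _ _ _ hc]

/-- generic 2D-table write. -/
theorem set_table (N r0 c0 : Nat) (g : Nat → Nat → Int) (v : Int) (hr : r0 < N) (hc : c0 < N) :
    pvSet2 ((List.range N).map (fun r => (List.range N).map (g r))) (r0 : Int) (c0 : Int) v
      = (List.range N).map (fun r => (List.range N).map
          (fun j => if r = r0 ∧ j = c0 then v else g r j)) := by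
  unfold pvSet2
  rw [pvRow_map_range _ _ _ hr]
  rw [pySetD_map_range _ _ _ _ hc]
  rw [pySetD_map_range _ _ _ _ hr]
  apply map_range_ext
  intro r hrr
  by_cases h : r = r0
  · subst h
    rw [if_pos rfl]
    apply map_range_ext
    intro j hj
    by_cases hj' : j = c0
    · subst hj'; simp
    · simp [hj']
  · simp only [if_neg h]
    apply map_range_ext
    intro j hj
    simp [h]

-- A-side table ----------------------------------------------------------------

/-- cell (r,j) of A's partial table: rows below i done, row i filled from column m on. -/
def cellP (l : List Char) (i m r j : Nat) : Int :=
  if r < i then specA l r j else if r = i ∧ m ≤ j then specA l r j else 0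

def tabP (l : List Char) (i m : Nat) : List (List Int) :=
  (List.range (l.length + 1)).map (fun r => (List.range (l.length + 1)).map (cellP l i m r))

theorem tabP_shift (l : List Char) (i : Nat) (h : 1 ≤ i) :
    tabP l (i-1) 0 = tabP l i l.length := by
  unfold tabP
  apply map_range_ext
  intro r hr
  apply map_range_ext
  intro j hj
  unfold cellP
  by_cases h1 : r < i - 1
  · simp [h1, show r < i by omega]
  · by_cases h2 : r = i - 1
    · subst h2
      simp [show i - 1 < i by omega]
    · have h4 : ¬ r < i := by omega
      by_cases h6 : r = i
      · subst h6
        by_cases h3 : j = l.length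
        · subst h3; simp [h1, h2, specA_len]
        · simp [h1, h2, show ¬ (l.length ≤ j) by omega]
      · simp [h1, h4, h2, h6]

theorem tabP_init (l : List Char) :
    List.replicate (l.length + 1) (List.replicate (l.length + 1) (0 : Int)) = tabP l 0 0 := by
  unfold tabP
  apply List.ext_getElem (by simp)
  intro r h1 h2
  simp only [List.getElem_replicate, List.getElem_map, List.getElem_range]
  apply replicate_eq_map_range
  intro j hj
  unfold cellP
  by_cases h3 : r = 0
  · subst h3; simp [specA_zero]
  · simp [h3]

theorem read_tabP (l : List Char) (i0 m r c : Nat) (hr : r < l.length + 1)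
    (hc : c < l.length + 1) :
    pvGetI (pvRow (tabP l i0 m) (r : Int)) (c : Int) = cellP l i0 m r c := by
  unfold tabP
  rw [read_table _ _ _ _ hr hc]

theorem set_tabP (l : List Char) (i0 m r0 c0 : Nat) (v : Int) (hr : r0 < l.length + 1)
    (hc : c0 < l.length + 1) :
    pvSet2 (tabP l i0 m) (r0 : Int) (c0 : Int) v
      = (List.range (l.length + 1)).map (fun r => (List.range (l.length + 1)).map
          (fun j => if r = r0 ∧ j = c0 then v else cellP l i0 m r j)) := by
  unfold tabP
  rw [set_table _ _ _ _ _ hr hc]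

theorem tabP_step_eq (l : List Char) (i m : Nat) (h1 : 1 ≤ i) (h2 : i ≤ l.length)
    (hm : m < l.length) :
    (List.range (l.length + 1)).map (fun r => (List.range (l.length + 1)).map
        (fun j => if r = i ∧ j = m then specA l i m else cellP l i (m+1) r j))
      = tabP l i m := by
  unfold tabP
  apply map_range_ext
  intro r hr
  apply map_range_ext
  intro j hj
  by_cases h : r = i ∧ j = m
  · obtain ⟨rfl, rfl⟩ := h
    simp [cellP]
  · rw [if_neg h]
    unfold cellP
    by_cases hr' : r < i
    · simp [hr']
    · by_cases hri : r = i
      · subst hri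
        have hne : j ≠ m := fun hj' => h ⟨rfl, hj'⟩
        by_cases hjm : m + 1 ≤ j
        · simp [hjm, show m ≤ j by omega]
        · simp [hjm, show ¬ (m ≤ j) by omega]
      · simp [hr', hri]

theorem tabP_set_self (l : List Char) (r0 c0 : Nat) (hr : r0 ≤ l.length) (hc : c0 ≤ l.length) :
    (List.range (l.length + 1)).map (fun r => (List.range (l.length + 1)).map
        (fun j => if r = r0 ∧ j = c0 then specA l r0 c0 else cellP l l.length 0 r j))
      = tabP l l.length 0 := by
  unfold tabP
  apply map_range_ext
  intro r hr'
  apply map_range_ext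
  intro j hj
  by_cases h : r = r0 ∧ j = c0
  · obtain ⟨rfl, rfl⟩ := h
    unfold cellP
    by_cases h2 : r < l.length
    · simp [h2]
    · have : r = l.length := by omega
      subst this
      simp
  · rw [if_neg h]

theorem stepA1 (l : List Char) (i m : Nat) (h1 : 1 ≤ i) (h2 : i ≤ l.length)
    (hm : m < l.length) :
    (if PySem.List.pyGet? l ((i : Int) - 1) = PySem.List.pyGet? l (m : Int) then
        pvSet2 (tabP l i (m+1)) (i : Int) (m : Int)
          (1 + pvGetI (pvRow (tabP l i (m+1)) ((i : Int) - 1)) ((m : Int) + 1))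
      else
        pvSet2 (tabP l i (m+1)) (i : Int) (m : Int)
          (max (pvGetI (pvRow (tabP l i (m+1)) ((i : Int) - 1)) (m : Int))
               (pvGetI (pvRow (tabP l i (m+1)) (i : Int)) ((m : Int) + 1))))
      = tabP l i m := by
  have e1 : (i : Int) - 1 = ((i - 1 : Nat) : Int) := by omega
  have e2 : (m : Int) + 1 = ((m + 1 : Nat) : Int) := by omega
  rw [e1, e2]
  rw [read_tabP l i (m+1) (i-1) (m+1) (by omega) (by omega)]
  rw [read_tabP l i (m+1) (i-1) m (by omega) (by omega)]
  rw [read_tabP l i (m+1) i (m+1) (by omega) (by omega)]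
  have c1 : cellP l i (m+1) (i-1) (m+1) = specA l (i-1) (m+1) := by
    unfold cellP; simp [show i - 1 < i by omega]
  have c2 : cellP l i (m+1) (i-1) m = specA l (i-1) m := by
    unfold cellP; simp [show i - 1 < i by omega]
  have c3 : cellP l i (m+1) i (m+1) = specA l i (m+1) := by
    unfold cellP; simp
  rw [c1, c2, c3]
  rw [show PySem.List.pyGet? l ((i - 1 : Nat) : Int) = some (l[i-1]'(by omega)) from by
        rw [PySem.List.pyGet?_natCast]; exact List.getElem?_eq_getElem (by omega)]
  rw [show PySem.List.pyGet? l ((m : Nat) : Int) = some (l[m]'hm) from by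
        rw [PySem.List.pyGet?_natCast]; exact List.getElem?_eq_getElem hm]
  by_cases hch : l[i-1]'(by omega) = l[m]'hm
  · rw [if_pos (by rw [hch])]
    have hv : (1 : Int) + specA l (i-1) (m+1) = specA l i m := by
      rw [specA_rec l i m h1 h2 hm, if_pos hch]
      exact Int.add_comm 1 _
    rw [hv, set_tabP l i (m+1) i m _ (by omega) (by omega), tabP_step_eq l i m h1 h2 hm]
  · rw [if_neg (fun hso => hch (Option.some.inj hso))]
    have hv : max (specA l (i-1) m) (specA l i (m+1)) = specA l i m := by
      rw [specA_rec l i m h1 h2 hm, if_neg hch]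
    rw [hv, set_tabP l i (m+1) i m _ (by omega) (by omega), tabP_step_eq l i m h1 h2 hm]

theorem stepOuterA (l : List Char) (i : Nat) (h1 : 1 ≤ i) (h2 : i ≤ l.length) :
    (PySem.List.pyRange ((l.length : Int) - 1) (-1) (-1)).foldl
      (fun dp j =>
        if PySem.List.pyGet? l ((i : Int) - 1) = PySem.List.pyGet? l j then
          pvSet2 dp (i : Int) j (1 + pvGetI (pvRow dp ((i : Int) - 1)) (j + 1))
        else
          pvSet2 dp (i : Int) j (max (pvGetI (pvRow dp ((i : Int) - 1)) j)
            (pvGetI (pvRow dp (i : Int)) (j + 1))))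
      (tabP l (i - 1) 0) = tabP l i 0 := by
  rw [tabP_shift l i h1]
  refine foldl_pyRange_down _ (fun m => tabP l i m) l.length ?_
  exact fun m hm => stepA1 l i m h1 h2 hm

theorem loop2_fixed (l : List Char) (i j : Int) (h1 : 1 ≤ i) (h2 : i ≤ (l.length : Int))
    (h3 : 0 ≤ j) (h4 : j < (l.length : Int)) :
    (if PySem.List.pyGet? l (i - 1) = PySem.List.pyGet? l j then
        pvSet2 (tabP l l.length 0) i j
          (1 + pvGetI (pvRow (tabP l l.length 0) (i - 1)) (j + 1))
      else tabP l l.length 0) = tabP l l.length 0 := by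
  lift i to ℕ using (by omega)
  lift j to ℕ using h3
  have e1 : ((i : Nat) : Int) - 1 = ((i - 1 : Nat) : Int) := by omega
  have e2 : ((j : Nat) : Int) + 1 = ((j + 1 : Nat) : Int) := by omega
  rw [e1, e2]
  rw [read_tabP l l.length 0 (i-1) (j+1) (by omega) (by omega)]
  have c1 : cellP l l.length 0 (i-1) (j+1) = specA l (i-1) (j+1) := by
    unfold cellP; simp [show i - 1 < l.length by omega]
  rw [c1]
  rw [show PySem.List.pyGet? l ((i - 1 : Nat) : Int) = some (l[i-1]'(by omega)) from by
        rw [PySem.List.pyGet?_natCast]; exact List.getElem?_eq_getElem (by omega)]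
  rw [show PySem.List.pyGet? l ((j : Nat) : Int) = some (l[j]'(by omega)) from by
        rw [PySem.List.pyGet?_natCast]; exact List.getElem?_eq_getElem (by omega)]
  by_cases hch : l[i-1]'(by omega) = l[j]'(by omega)
  · rw [if_pos (by rw [hch])]
    have hv : (1 : Int) + specA l (i-1) (j+1) = specA l i j := by
      rw [specA_rec l i j (by omega) (by omega) (by omega), if_pos hch]
      exact Int.add_comm 1 _
    rw [hv, set_tabP l l.length 0 i j _ (by omega) (by omega),
        tabP_set_self l i j (by omega) (by omega)]
  · rw [if_neg (fun hso => hch (Option.some.inj hso))]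

theorem loop2_noop (l : List Char) :
    (PySem.List.pyRange 1 ((l.length : Int) + 1) 1).foldl
      (fun dp i => (PySem.List.pyRange ((l.length : Int) - 1) (-1) (-1)).foldl
        (fun dp j =>
          if PySem.List.pyGet? l (i - 1) = PySem.List.pyGet? l j then
            pvSet2 dp i j (1 + pvGetI (pvRow dp (i - 1)) (j + 1))
          else dp) dp)
      (tabP l l.length 0) = tabP l l.length 0 := by
  refine foldl_fixed _ _ _ ?_
  intro i hi
  obtain ⟨h1, h2⟩ := PySem.List.mem_pyRange_one.mp hi
  refine foldl_fixed _ _ _ ?_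
  intro j hj
  obtain ⟨h3, h4⟩ := PySem.List.mem_pyRange_neg_one.mp hj
  exact loop2_fixed l i j h1 (by omega) (by omega) (by omega)

theorem portA_eq (s : String) :
    almostPalindromic s = min ((s.toList.length : Int)) (1 + lcsI s.toList.reverse s.toList) := by
  simp only [almostPalindromic]
  generalize s.toList = l
  rw [tabP_init l]
  have hloop1 : (PySem.List.pyRange 1 ((l.length : Int) + 1) 1).foldl
      (fun dp i => (PySem.List.pyRange ((l.length : Int) - 1) (-1) (-1)).foldl
        (fun dp j =>
          if PySem.List.pyGet? l (i - 1) = PySem.List.pyGet? l j then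
            pvSet2 dp i j (1 + pvGetI (pvRow dp (i - 1)) (j + 1))
          else
            pvSet2 dp i j (max (pvGetI (pvRow dp (i - 1)) j) (pvGetI (pvRow dp i) (j + 1)))) dp)
      (tabP l 0 0) = tabP l l.length 0 := by
    refine foldl_pyRange_up _ (fun k => tabP l k 0) l.length ?_
    exact fun i hi1 hi2 => stepOuterA l i hi1 hi2
  rw [hloop1, loop2_noop l]
  rw [show (0 : Int) = ((0 : Nat) : Int) from rfl]
  rw [read_tabP l l.length 0 l.length 0 (by omega) (by omega)]
  rw [show cellP l l.length 0 l.length 0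
        = specA l l.length 0 from by unfold cellP; simp]
  rw [show specA l l.length 0 = lcsI l.reverse l from by
        unfold specA; simp]

-- longest palindromic subsequence (two-ended interval recursion) ---------------

def lpsI : List Char → Int
  | [] => 0
  | a :: rest =>
    if h : rest = [] then 1
    else if a = rest.getLastD a then 2 + lpsI rest.dropLast
    else max (lpsI (a :: rest.dropLast)) (lpsI rest)
termination_by l => l.length
decreasing_by all_goals
  (simp only [List.length_cons, List.length_dropLast]
   have := List.length_pos_iff.mpr h
   omega)

theorem lpsI_nil : lpsI [] = 0 := by rw [lpsI]
theorem lpsI_single (a : Char) : lpsI [a] = 1 := by rw [lpsI]; simp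

theorem lpsI_two (a c : Char) (m : List Char) :
    lpsI (a :: m ++ [c])
      = if a = c then 2 + lpsI m else max (lpsI (a :: m)) (lpsI (m ++ [c])) := by
  show lpsI (a :: (m ++ [c])) = _
  rw [lpsI, dif_neg (by simp)]
  rw [List.getLastD_concat, List.dropLast_concat]

theorem lpsI_nonneg_aux : ∀ (n : Nat) (l : List Char), l.length ≤ n → 0 ≤ lpsI l := by
  intro n
  induction n with
  | zero =>
    intro l hl
    have hle : l = [] := List.length_eq_zero_iff.mp (by omega)
    subst hle
    rw [lpsI_nil]
  | succ k ih =>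
    intro l hl
    cases l with
    | nil => rw [lpsI_nil]
    | cons a rest =>
      rcases List.eq_nil_or_concat rest with rfl | ⟨m, c, rfl⟩
      · rw [lpsI_single]; omega
      · simp only [List.concat_eq_append] at *
        rw [show a :: (m ++ [c]) = a :: m ++ [c] by simp, lpsI_two]
        have h1 : 0 ≤ lpsI m := ih m (by simp at hl; omega)
        have h2 : 0 ≤ lpsI (m ++ [c]) := ih (m ++ [c]) (by simp at hl ⊢; omega)
        split_ifs <;> omega

theorem lpsI_nonneg (l : List Char) : 0 ≤ lpsI l := lpsI_nonneg_aux l.length l le_rfl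

theorem one_le_lpsI_aux : ∀ (n : Nat) (l : List Char), l.length ≤ n → l ≠ [] → 1 ≤ lpsI l := by
  intro n
  induction n with
  | zero =>
    intro l hl hne
    exact absurd (List.length_eq_zero_iff.mp (by omega)) hne
  | succ k ih =>
    intro l hl hne
    cases l with
    | nil => exact absurd rfl hne
    | cons a rest =>
      rcases List.eq_nil_or_concat rest with rfl | ⟨m, c, rfl⟩
      · rw [lpsI_single]
      · simp only [List.concat_eq_append] at *
        rw [show a :: (m ++ [c]) = a :: m ++ [c] by simp, lpsI_two]
        have h1 : 0 ≤ lpsI m := lpsI_nonneg m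
        have h2 : 1 ≤ lpsI (m ++ [c]) := ih (m ++ [c]) (by simp at hl ⊢; omega) (by simp)
        split_ifs <;> omega

theorem one_le_lpsI (l : List Char) (h : l ≠ []) : 1 ≤ lpsI l :=
  one_le_lpsI_aux l.length l le_rfl h

-- sublist helpers --------------------------------------------------------------

theorem snoc_sublist_snoc {α : Type} {v m : List α} {d b : α}
    (h : (v ++ [d]).Sublist (m ++ [b])) : v.Sublist m := by
  have h' : (d :: v.reverse).Sublist (b :: m.reverse) := by
    have := h.reverse
    simpa using this
  rw [← List.reverse_sublist]
  cases h' with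
  | cons _ h2 => exact (List.sublist_cons_self d v.reverse).trans h2
  | cons₂ _ h2 => exact h2

theorem snoc_sublist_snoc_ne {α : Type} {v m : List α} {d b : α}
    (h : (v ++ [d]).Sublist (m ++ [b])) (hne : d ≠ b) : (v ++ [d]).Sublist m := by
  have h' : (d :: v.reverse).Sublist (b :: m.reverse) := by
    have := h.reverse
    simpa using this
  cases h' with
  | cons _ h2 =>
    have := (List.reverse_sublist (l₁ := v ++ [d]) (l₂ := m)).mp (by simpa using h2)
    exact this
  | cons₂ _ h2 => exact absurd rfl hne

theorem cons_sublist_cons_ne {α : Type} {v m : List α} {c a : α}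
    (h : (c :: v).Sublist (a :: m)) (hne : c ≠ a) : (c :: v).Sublist m := by
  cases h with
  | cons _ h2 => exact h2
  | cons₂ _ h2 => exact absurd rfl hne

theorem strip_sublist {α : Type} {v m : List α} {c d a b : α}
    (h : (c :: v ++ [d]).Sublist (a :: m ++ [b])) : v.Sublist m := by
  have h1 : (v ++ [d]).Sublist (m ++ [b]) := by
    cases h with
    | cons _ h2 => exact (List.sublist_cons_self c (v ++ [d])).trans h2
    | cons₂ _ h2 => exact h2
  exact snoc_sublist_snoc h1

theorem pal_decomp {u : List Char} (hpal : u.reverse = u) (hlen : 2 ≤ u.length) :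
    ∃ c v, u = c :: v ++ [c] ∧ v.reverse = v := by
  cases u with
  | nil => simp at hlen
  | cons c w =>
    rcases List.eq_nil_or_concat w with rfl | ⟨v, d, rfl⟩
    · simp at hlen
    · simp only [List.concat_eq_append] at *
      have hrev : d :: (v.reverse ++ [c]) = c :: (v ++ [d]) := by
        have := hpal
        simp only [List.reverse_cons, List.reverse_append] at this
        simpa using this
      simp only [List.cons.injEq] at hrev
      obtain ⟨hdc, htail⟩ := hrev
      subst hdc
      have hv : v.reverse = v := (List.append_left_inj _).mp htail
      exact ⟨d, v, rfl, hv⟩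

-- lcsI is the maximal common-subsequence length ---------------------------------

theorem lcsI_nonneg : ∀ a b : List Char, 0 ≤ lcsI a b := by
  intro a b
  induction a, b using lcsI.induct with
  | case1 b => rw [lcsI]
  | case2 a as => exact le_of_eq (lcsI_nil_right _).symm
  | case3 as b bs ih => rw [lcsI_cons_cons, if_pos rfl]; omega
  | case4 a as b bs hne ih1 ih2 => rw [lcsI_cons_cons, if_neg hne]; omega

theorem length_le_lcsI : ∀ (a b : List Char) (u : List Char),
    u.Sublist a → u.Sublist b → (u.length : Int) ≤ lcsI a b := by
  intro a b
  induction a, b using lcsI.induct with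
  | case1 b =>
    intro u h1 _
    rw [List.sublist_nil.mp h1, lcsI]
    simp
  | case2 a as =>
    intro u _ h2
    rw [List.sublist_nil.mp h2, lcsI_nil_right]
    simp
  | case3 as b bs ih =>
    intro u h1 h2
    rw [lcsI_cons_cons, if_pos rfl]
    cases u with
    | nil =>
      have := lcsI_nonneg as bs
      simp only [List.length_nil, Nat.cast_zero]
      omega
    | cons c u' =>
      have huu' : u'.Sublist (c :: u') := List.sublist_cons_self c u'
      cases h1 with
      | cons _ h1' =>
        cases h2 with
        | cons _ h2' =>
          have := ih (c :: u') h1' h2'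
          simp only [List.length_cons] at this ⊢
          push_cast at this ⊢
          omega
        | cons₂ _ h2' =>
          have := ih u' (huu'.trans h1') h2'
          simp only [List.length_cons]
          push_cast
          omega
      | cons₂ _ h1' =>
        cases h2 with
        | cons _ h2' =>
          have := ih u' h1' (huu'.trans h2')
          simp only [List.length_cons]
          push_cast
          omega
        | cons₂ _ h2' =>
          have := ih u' h1' h2'
          simp only [List.length_cons]
          push_cast
          omega
  | case4 a as b bs hne ih1 ih2 =>
    intro u h1 h2
    rw [lcsI_cons_cons, if_neg hne]
    cases u with
    | nil =>
      have := lcsI_nonneg as (b :: bs)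
      simp only [List.length_nil, Nat.cast_zero]
      omega
    | cons c u' =>
      cases h1 with
      | cons _ h1' =>
        have := ih1 (c :: u') h1' h2
        omega
      | cons₂ _ h1' =>
        have h2' : (a :: u').Sublist bs := by
          cases h2 with
          | cons _ h2'' => exact h2''
          | cons₂ _ h2'' => exact absurd rfl hne
        have := ih2 (a :: u') (List.cons_sublist_cons.mpr h1') h2'
        omega

theorem exists_lcs : ∀ a b : List Char,
    ∃ u : List Char, u.Sublist a ∧ u.Sublist b ∧ (u.length : Int) = lcsI a b := by
  intro a b
  induction a, b using lcsI.induct with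
  | case1 b => exact ⟨[], List.nil_sublist _, List.nil_sublist _, by rw [lcsI]; simp⟩
  | case2 a as => exact ⟨[], List.nil_sublist _, List.nil_sublist _, by rw [lcsI_nil_right]; simp⟩
  | case3 as b bs ih =>
    obtain ⟨u, hu1, hu2, hlen⟩ := ih
    refine ⟨b :: u, List.cons_sublist_cons.mpr hu1, List.cons_sublist_cons.mpr hu2, ?_⟩
    rw [lcsI_cons_cons, if_pos rfl]
    simp only [List.length_cons]
    push_cast
    omega
  | case4 a as b bs hne ih1 ih2 =>
    rw [lcsI_cons_cons]
    by_cases hm : lcsI (a :: as) bs ≤ lcsI as (b :: bs)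
    · obtain ⟨u, hu1, hu2, hlen⟩ := ih1
      refine ⟨u, hu1.trans (List.sublist_cons_self a as), hu2, ?_⟩
      rw [if_neg hne, max_eq_left hm]
      exact hlen
    · obtain ⟨u, hu1, hu2, hlen⟩ := ih2
      refine ⟨u, hu1, hu2.trans (List.sublist_cons_self b bs), ?_⟩
      rw [if_neg hne, max_eq_right (by omega)]
      exact hlen

-- lpsI is the maximal palindromic-subsequence length ----------------------------

theorem pal_length_le_lpsI_aux : ∀ (n : Nat) (l : List Char), l.length ≤ n →
    ∀ u : List Char, u.Sublist l → u.reverse = u → (u.length : Int) ≤ lpsI l := by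
  intro n
  induction n with
  | zero =>
    intro l hl u hu _
    have hle : l = [] := List.length_eq_zero_iff.mp (by omega)
    subst hle
    rw [List.sublist_nil.mp hu, lpsI_nil]
    simp
  | succ k ih =>
    intro l hl u hu hpal
    cases l with
    | nil =>
      rw [List.sublist_nil.mp hu, lpsI_nil]; simp
    | cons a w =>
      rcases List.eq_nil_or_concat w with rfl | ⟨m, b, rfl⟩
      · have : u.length ≤ 1 := hu.length_le
        rw [lpsI_single]
        exact_mod_cast this
      · simp only [List.concat_eq_append] at *
        by_cases hsmall : u.length ≤ 1
        · have h1 : (1 : Int) ≤ lpsI (a :: (m ++ [b])) := one_le_lpsI _ (by simp)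
          have h2 : (u.length : Int) ≤ 1 := by exact_mod_cast hsmall
          omega
        · obtain ⟨c, v, rfl, hvpal⟩ := pal_decomp hpal (by omega)
          have hvm : v.Sublist m := strip_sublist (by simpa using hu)
          have hml : m.length ≤ k := by
            have := hl
            simp at this
            omega
          rw [show a :: (m ++ [b]) = a :: m ++ [b] from by simp, lpsI_two]
          by_cases hab : a = b
          · rw [if_pos hab]
            have := ih m hml v hvm hvpal
            have hlen : (c :: v ++ [c]).length = v.length + 2 := by simp
            rw [hlen]
            push_cast
            omega
          · rw [if_neg hab]
            by_cases hcb : c = b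
            · have hca : c ≠ a := fun h => hab (h ▸ hcb)
              have hu' : (c :: v ++ [c]).Sublist (m ++ [b]) := by
                refine cons_sublist_cons_ne ?_ hca
                simpa using hu
              have := ih (m ++ [b]) (by simp at hl ⊢; omega) (c :: v ++ [c]) hu' hpal
              exact this.trans (le_max_right _ _)
            · have hu' : (c :: v ++ [c]).Sublist (a :: m) := by
                refine snoc_sublist_snoc_ne (v := c :: v) ?_ hcb
                simpa using hu
              have := ih (a :: m) (by simp at hl ⊢; omega) (c :: v ++ [c]) hu' hpal
              exact this.trans (le_max_left _ _)

theorem pal_length_le_lpsI (l u : List Char) (hu : u.Sublist l) (hpal : u.reverse = u) :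
    (u.length : Int) ≤ lpsI l :=
  pal_length_le_lpsI_aux l.length l le_rfl u hu hpal

theorem exists_pal_aux : ∀ (n : Nat) (l : List Char), l.length ≤ n →
    ∃ u : List Char, u.Sublist l ∧ u.reverse = u ∧ (u.length : Int) = lpsI l := by
  intro n
  induction n with
  | zero =>
    intro l hl
    have hle : l = [] := List.length_eq_zero_iff.mp (by omega)
    subst hle
    exact ⟨[], List.nil_sublist _, rfl, by rw [lpsI_nil]; simp⟩
  | succ k ih =>
    intro l hl
    cases l with
    | nil => exact ⟨[], List.nil_sublist _, rfl, by rw [lpsI_nil]; simp⟩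
    | cons a w =>
      rcases List.eq_nil_or_concat w with rfl | ⟨m, b, rfl⟩
      · exact ⟨[a], by simp, rfl, by rw [lpsI_single]; simp⟩
      · simp only [List.concat_eq_append] at *
        have hml : m.length ≤ k := by simp at hl; omega
        have hml2 : m.length + 2 ≤ k + 1 := by simpa using hl
        rw [show a :: (m ++ [b]) = a :: m ++ [b] from by simp, lpsI_two]
        by_cases hab : a = b
        · obtain ⟨u, hu1, hu2, hlen⟩ := ih m hml
          refine ⟨a :: u ++ [a], ?_, ?_, ?_⟩
          · rw [show a :: u ++ [a] = a :: (u ++ [a]) from by simp,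
                show a :: m ++ [b] = a :: (m ++ [b]) from by simp]
            exact List.cons_sublist_cons.mpr (hab ▸ List.Sublist.append hu1 (List.Sublist.refl _))
          · simp [hu2]
          · rw [if_pos hab]
            have hlen2 : (a :: u ++ [a]).length = u.length + 2 := by simp
            rw [hlen2]
            push_cast
            omega
        · rw [if_neg hab]
          by_cases hm : lpsI (m ++ [b]) ≤ lpsI (a :: m)
          · obtain ⟨u, hu1, hu2, hlen⟩ := ih (a :: m) (by simp; omega)
            refine ⟨u, hu1.trans (List.sublist_append_left (a :: m) [b]), hu2, ?_⟩
            rw [max_eq_left hm]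
            exact hlen
          · obtain ⟨u, hu1, hu2, hlen⟩ := ih (m ++ [b]) (by simp; omega)
            refine ⟨u, ?_, hu2, ?_⟩
            · refine hu1.trans ?_
              rw [show a :: m ++ [b] = a :: (m ++ [b]) by simp]
              exact List.sublist_cons_self a (m ++ [b])
            · rw [max_eq_right (by omega)]
              exact hlen

theorem exists_pal (l : List Char) :
    ∃ u : List Char, u.Sublist l ∧ u.reverse = u ∧ (u.length : Int) = lpsI l :=
  exists_pal_aux l.length l le_rfl

-- the crossing argument: u and u.reverse both subsequences of l ⇒ palindrome ≥ |u|

theorem crossing (u l : List Char) (h1 : u.Sublist l) (h2 : u.reverse.Sublist l) :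
    ∃ p : List Char, p.Sublist l ∧ p.reverse = p ∧ u.length ≤ p.length := by
  set k := u.length with hk
  set t := k / 2 with ht
  have htk : t ≤ k := Nat.div_le_self _ _
  by_cases hpar : k % 2 = 0
  · -- even: u = p0 ++ s with |p0| = |s| = t
    have hkt : k = t + t := by omega
    have hsplit : u = u.take t ++ u.drop t := (List.take_append_drop t u).symm
    rw [hsplit] at h1
    obtain ⟨A, B, hlAB, hA, hB⟩ := List.append_sublist_iff.mp h1
    have hrev : u.reverse = (u.drop t).reverse ++ (u.take t).reverse := by
      rw [hsplit]; simp
    rw [hrev] at h2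
    obtain ⟨C, D, hlCD, hC, hD⟩ := List.append_sublist_iff.mp h2
    have heq : A ++ B = C ++ D := by rw [← hlAB, ← hlCD]
    rcases List.append_eq_append_iff.mp heq with ⟨mid, hC', hB'⟩ | ⟨mid, hA', hD'⟩
    · -- C = A ++ mid, B = mid ++ D : palindrome p0 ++ rev p0
      refine ⟨u.take t ++ (u.take t).reverse, ?_, by simp, ?_⟩
      · have : (u.take t ++ (u.take t).reverse).Sublist (A ++ D) := List.Sublist.append hA hD
        refine this.trans ?_
        rw [hlAB, hB']
        rw [show A ++ (mid ++ D) = (A ++ mid) ++ D by simp]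
        exact List.Sublist.append (List.sublist_append_left A mid) (List.Sublist.refl D)
      · simp [List.length_take]
        omega
    · -- A = C ++ mid, D = mid ++ B : palindrome rev s ++ s
      refine ⟨(u.drop t).reverse ++ u.drop t, ?_, by simp, ?_⟩
      · have : ((u.drop t).reverse ++ u.drop t).Sublist (C ++ B) := List.Sublist.append hC hB
        refine this.trans ?_
        rw [hlAB, hA']
        rw [show C ++ mid ++ B = C ++ (mid ++ B) by simp]
        exact List.Sublist.append (List.Sublist.refl C) (List.sublist_append_right mid B)
      · simp [List.length_drop]
        omega
  · -- odd: u = p0 ++ c :: s with |p0| = |s| = t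
    have hkt : k = t + t + 1 := by omega
    have htlt : t < u.length := by omega
    have hdrop : u.drop t = u[t] :: u.drop (t+1) := List.drop_eq_getElem_cons htlt
    have hsplit : u = (u.take t ++ [u[t]]) ++ u.drop (t+1) := by
      conv_lhs => rw [← List.take_append_drop t u]
      rw [hdrop]
      simp
    have hlP : (u.take t).length = t := by simp [List.length_take]; omega
    have hlS : (u.drop (t+1)).length = t := by simp [List.length_drop]; omega
    set c : Char := u[t] with hcdef
    set P : List Char := u.take t with hPdef
    set S : List Char := u.drop (t+1) with hSdef
    rw [hsplit] at h1
    obtain ⟨A, B, hlAB, hA, hB⟩ := List.append_sublist_iff.mp h1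
    have hrev : u.reverse = (S.reverse ++ [c]) ++ P.reverse := by
      conv_lhs => rw [hsplit]
      simp
    rw [hrev] at h2
    obtain ⟨C, D, hlCD, hC, hD⟩ := List.append_sublist_iff.mp h2
    have heq : A ++ B = C ++ D := by rw [← hlAB, ← hlCD]
    rcases List.append_eq_append_iff.mp heq with ⟨mid, hC', hB'⟩ | ⟨mid, hA', hD'⟩
    · refine ⟨(P ++ [c]) ++ P.reverse, ?_, ?_, ?_⟩
      · have hsub : ((P ++ [c]) ++ P.reverse).Sublist (A ++ D) := List.Sublist.append hA hD
        refine hsub.trans ?_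
        rw [hlAB, hB']
        rw [show A ++ (mid ++ D) = (A ++ mid) ++ D by simp]
        exact List.Sublist.append (List.sublist_append_left A mid) (List.Sublist.refl D)
      · simp
      · simp [hlP]
        omega
    · refine ⟨(S.reverse ++ [c]) ++ S, ?_, ?_, ?_⟩
      · have hsub : ((S.reverse ++ [c]) ++ S).Sublist (C ++ B) := List.Sublist.append hC hB
        refine hsub.trans ?_
        rw [hlAB, hA']
        rw [show C ++ mid ++ B = C ++ (mid ++ B) by simp]
        exact List.Sublist.append (List.Sublist.refl C) (List.sublist_append_right mid B)
      · simp
      · simp [hlS]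
        omega

theorem lcs_rev_eq_lps (l : List Char) : lcsI l.reverse l = lpsI l := by
  apply le_antisymm
  · obtain ⟨u, h1, h2, hlen⟩ := exists_lcs l.reverse l
    have h1' : u.reverse.Sublist l := by
      have := h1.reverse
      simpa using this
    obtain ⟨p, hp, hpal, hle⟩ := crossing u l h2 h1'
    calc lcsI l.reverse l = (u.length : Int) := hlen.symm
      _ ≤ (p.length : Int) := by exact_mod_cast hle
      _ ≤ lpsI l := pal_length_le_lpsI l p hp hpal
  · obtain ⟨p, hp, hpal, hlen⟩ := exists_pal l
    have hp' : p.Sublist l.reverse := by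
      have := hp.reverse
      rwa [hpal] at this
    rw [← hlen]
    exact length_le_lcsI l.reverse l p hp' hp

-- B-side table ----------------------------------------------------------------

/-- the substring l[i..j] (inclusive). -/
def subL (l : List Char) (i j : Nat) : List Char := (l.drop i).take (j + 1 - i)

theorem subL_self (l : List Char) (i : Nat) (hi : i < l.length) :
    subL l i i = [l[i]] := by
  unfold subL
  rw [show i + 1 - i = 1 by omega]
  rw [List.drop_eq_getElem_cons hi, show (1 : Nat) = 0 + 1 from rfl, List.take_succ_cons,
      List.take_zero]

theorem subL_empty (l : List Char) (i j : Nat) (h : j + 1 ≤ i) : subL l i j = [] := by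
  unfold subL
  rw [show j + 1 - i = 0 by omega]
  simp

theorem subL_cons (l : List Char) (i j : Nat) (h1 : i ≤ j) (h2 : j < l.length) :
    subL l i j = l[i]'(by omega) :: subL l (i+1) j := by
  unfold subL
  rw [show j + 1 - i = (j - i) + 1 by omega, show j + 1 - (i + 1) = j - i by omega]
  rw [List.drop_eq_getElem_cons (show i < l.length by omega), List.take_succ_cons]

theorem subL_snoc (l : List Char) (r j : Nat) (h0 : 1 ≤ j) (_h1 : r ≤ j) (h2 : j < l.length) :
    subL l r j = subL l r (j-1) ++ [l[j]] := by
  unfold subL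
  rw [show j + 1 - r = (j - r) + 1 by omega]
  rw [List.take_succ]
  rw [show (j - 1) + 1 - r = j - r by omega]
  congr 1
  have hgl : (List.drop r l)[j - r]? = some (l[j]) := by
    rw [List.getElem?_drop, show r + (j - r) = j by omega]
    exact List.getElem?_eq_getElem h2
  rw [hgl]
  rfl

theorem subL_full (l : List Char) (h : l ≠ []) : subL l 0 (l.length - 1) = l := by
  unfold subL
  have : l.length - 1 + 1 - 0 = l.length := by
    have := List.length_pos_iff.mpr h
    omega
  rw [this]
  simp

/-- the dp recurrence for lpsI on substrings. -/
theorem lpsI_subL_rec (l : List Char) (i j : Nat) (h1 : i < j) (h2 : j < l.length) :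
    lpsI (subL l i j)
      = if l[i]'(by omega) = l[j] then lpsI (subL l (i+1) (j-1)) + 2
        else max (lpsI (subL l (i+1) j)) (lpsI (subL l i (j-1))) := by
  have hdec : subL l i j = l[i]'(by omega) :: subL l (i+1) (j-1) ++ [l[j]] := by
    rw [subL_cons l i j (by omega) h2]
    rw [subL_snoc l (i+1) j (by omega) (by omega) h2]
    simp
  rw [hdec, lpsI_two]
  by_cases hch : l[i]'(by omega) = l[j]
  · rw [if_pos hch, if_pos hch]
    omega
  · rw [if_neg hch, if_neg hch]
    have e1 : l[i]'(by omega) :: subL l (i+1) (j-1) = subL l i (j-1) := by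
      rw [subL_cons l i (j-1) (by omega) (by omega)]
    have e2 : subL l (i+1) (j-1) ++ [l[j]] = subL l (i+1) j := by
      rw [← subL_snoc l (i+1) j (by omega) (by omega) h2]
    rw [e1, e2, max_comm]

/-- cell (r,c) of B's partial table while filling length L, starts < i0 done at that length. -/
def cellQ (l : List Char) (L i0 r c : Nat) : Int :=
  if r ≤ c ∧ (c + 1 - r < L ∨ (c + 1 - r = L ∧ r < i0)) then lpsI (subL l r c) else 0

def tabQ (l : List Char) (L i0 : Nat) : List (List Int) :=
  (List.range l.length).map (fun r => (List.range l.length).map (cellQ l L i0 r))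

theorem tabQ_init (l : List Char) :
    List.replicate l.length (List.replicate l.length (0 : Int)) = tabQ l 1 0 := by
  unfold tabQ
  apply List.ext_getElem (by simp)
  intro r h1 h2
  simp only [List.getElem_replicate, List.getElem_map, List.getElem_range]
  apply replicate_eq_map_range
  intro j hj
  unfold cellQ
  rw [if_neg]
  rintro ⟨hrc, h | ⟨_, h0⟩⟩
  · omega
  · omega

theorem read_tabQ (l : List Char) (L i0 r c : Nat) (hr : r < l.length) (hc : c < l.length) :
    pvGetI (pvRow (tabQ l L i0) (r : Int)) (c : Int) = cellQ l L i0 r c := by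
  unfold tabQ
  rw [read_table _ _ _ _ hr hc]

theorem set_tabQ (l : List Char) (L i0 r0 c0 : Nat) (v : Int) (hr : r0 < l.length)
    (hc : c0 < l.length) :
    pvSet2 (tabQ l L i0) (r0 : Int) (c0 : Int) v
      = (List.range l.length).map (fun r => (List.range l.length).map
          (fun j => if r = r0 ∧ j = c0 then v else cellQ l L i0 r j)) := by
  unfold tabQ
  rw [set_table _ _ _ _ _ hr hc]

/-- one diagonal-init step. -/
theorem stepDiag (l : List Char) (i : Nat) (hi : i < l.length) :
    pvSet2 (tabQ l 1 i) (i : Int) (i : Int) 1 = tabQ l 1 (i+1) := by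
  rw [set_tabQ l 1 i i i 1 hi hi]
  unfold tabQ
  apply map_range_ext
  intro r hr
  apply map_range_ext
  intro c hc
  by_cases h : r = i ∧ c = i
  · rw [if_pos h]
    unfold cellQ
    rw [h.1, h.2, if_pos ⟨le_rfl, Or.inr ⟨by omega, by omega⟩⟩]
    rw [subL_self l i hi, lpsI_single]
  · rw [if_neg h]
    unfold cellQ
    by_cases hcond : r ≤ c ∧ (c + 1 - r < 1 ∨ (c + 1 - r = 1 ∧ r < i))
    · rw [if_pos hcond, if_pos ⟨hcond.1, hcond.2.imp id (fun ⟨hx, hy⟩ => ⟨hx, by omega⟩)⟩]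
    · rw [if_neg hcond, if_neg ?_]
      rintro ⟨hrc, hd | ⟨hd, hri⟩⟩
      · exact hcond ⟨hrc, Or.inl hd⟩
      · have hrc' : r = c := by omega
        have : r = i := by
          by_contra hne
          exact hcond ⟨hrc, Or.inr ⟨hd, by omega⟩⟩
        exact h ⟨this, by omega⟩

theorem tabQ_shift_diag (l : List Char) : tabQ l 1 l.length = tabQ l 2 0 := by
  unfold tabQ
  apply map_range_ext
  intro r hr
  apply map_range_ext
  intro c hc
  unfold cellQ
  by_cases hrc : r ≤ c
  · by_cases hd : c + 1 - r < 2
    · rw [if_pos ⟨hrc, by omega⟩, if_pos ⟨hrc, Or.inl hd⟩]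
    · rw [if_neg (by omega), if_neg (by omega)]
  · rw [if_neg (by omega), if_neg (by omega)]

/-- end of one length round: done-at-length-L everywhere = length < L+1. -/
theorem tabQ_shift_len (l : List Char) (L : Nat) (_h1 : 1 ≤ L) (hL : L ≤ l.length) :
    tabQ l L (l.length - L + 1) = tabQ l (L+1) 0 := by
  unfold tabQ
  apply map_range_ext
  intro r hr
  apply map_range_ext
  intro c hc
  unfold cellQ
  by_cases hrc : r ≤ c
  · by_cases hd : c + 1 - r < L + 1
    · rw [if_pos ⟨hrc, by omega⟩, if_pos ⟨hrc, by omega⟩]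
    · rw [if_neg (by omega), if_neg (by omega)]
  · rw [if_neg (by omega), if_neg (by omega)]

/-- one inner step of the interval loop. -/
theorem stepInner (l : List Char) (L i : Nat) (hL2 : 2 ≤ L) (hLn : L ≤ l.length)
    (hi : i < l.length - L + 1) :
    (if PySem.List.pyGet? l (i : Int) = PySem.List.pyGet? l ((i : Int) + (L : Int) - 1) then
        pvSet2 (tabQ l L i) (i : Int) ((i : Int) + (L : Int) - 1)
          (pvGetI (pvRow (tabQ l L i) ((i : Int)+1)) (((i : Int) + (L : Int) - 1) - 1) + 2)
      else
        pvSet2 (tabQ l L i) (i : Int) ((i : Int) + (L : Int) - 1)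
          (max (pvGetI (pvRow (tabQ l L i) ((i : Int)+1)) ((i : Int) + (L : Int) - 1))
               (pvGetI (pvRow (tabQ l L i) (i : Int)) (((i : Int) + (L : Int) - 1) - 1))))
      = tabQ l L (i+1) := by
  set j : Nat := i + L - 1 with hj
  have hjlt : j < l.length := by omega
  have hij : i < j := by omega
  have ej : (i : Int) + (L : Int) - 1 = ((j : Nat) : Int) := by omega
  have ej1 : ((j : Nat) : Int) - 1 = ((j - 1 : Nat) : Int) := by omega
  have ei1 : (i : Int) + 1 = ((i + 1 : Nat) : Int) := by omega
  rw [ej, ej1, ei1]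
  rw [read_tabQ l L i (i+1) (j-1) (by omega) (by omega)]
  rw [read_tabQ l L i (i+1) j (by omega) hjlt]
  rw [read_tabQ l L i i (j-1) (by omega) (by omega)]
  have c1 : cellQ l L i (i+1) (j-1) = lpsI (subL l (i+1) (j-1)) := by
    unfold cellQ
    by_cases hc : i + 1 ≤ j - 1
    · rw [if_pos ⟨hc, Or.inl (by omega)⟩]
    · rw [if_neg (by omega), subL_empty l (i+1) (j-1) (by omega), lpsI_nil]
  have c2 : cellQ l L i (i+1) j = lpsI (subL l (i+1) j) := by
    unfold cellQ
    rw [if_pos ⟨by omega, Or.inl (by omega)⟩]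
  have c3 : cellQ l L i i (j-1) = lpsI (subL l i (j-1)) := by
    unfold cellQ
    rw [if_pos ⟨by omega, Or.inl (by omega)⟩]
  rw [c1, c2, c3]
  rw [show PySem.List.pyGet? l ((i : Nat) : Int) = some (l[i]'(by omega)) from by
        rw [PySem.List.pyGet?_natCast]; exact List.getElem?_eq_getElem (by omega)]
  rw [show PySem.List.pyGet? l ((j : Nat) : Int) = some (l[j]'hjlt) from by
        rw [PySem.List.pyGet?_natCast]; exact List.getElem?_eq_getElem hjlt]
  have hset : ∀ v : Int, v = lpsI (subL l i j) →
      pvSet2 (tabQ l L i) (i : Int) (j : Int) v = tabQ l L (i+1) := by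
    intro v hv
    subst hv
    rw [set_tabQ l L i i j _ (by omega) hjlt]
    unfold tabQ
    apply map_range_ext
    intro r hr
    apply map_range_ext
    intro c hc
    by_cases h : r = i ∧ c = j
    · obtain ⟨rfl, rfl⟩ := h
      rw [if_pos ⟨rfl, rfl⟩]
      unfold cellQ
      rw [if_pos ⟨by omega, Or.inr ⟨by omega, by omega⟩⟩]
    · rw [if_neg h]
      unfold cellQ
      by_cases hcond : r ≤ c ∧ (c + 1 - r < L ∨ (c + 1 - r = L ∧ r < i))
      · rw [if_pos hcond, if_pos ⟨hcond.1, hcond.2.imp id (fun ⟨hx, hy⟩ => ⟨hx, by omega⟩)⟩]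
      · rw [if_neg hcond, if_neg ?_]
        rintro ⟨hrc, hd | ⟨hd, hri⟩⟩
        · exact hcond ⟨hrc, Or.inl hd⟩
        · have : r = i := by
            by_contra hne
            exact hcond ⟨hrc, Or.inr ⟨hd, by omega⟩⟩
          exact h ⟨this, by omega⟩
  by_cases hch : l[i]'(by omega) = l[j]'hjlt
  · rw [if_pos (by rw [hch])]
    apply hset
    rw [lpsI_subL_rec l i j hij hjlt, if_pos hch]
  · rw [if_neg (fun hso => hch (Option.some.inj hso))]
    apply hset
    rw [lpsI_subL_rec l i j hij hjlt, if_neg hch]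

/-- one outer (length) step. -/
theorem stepOuterQ (l : List Char) (L : Nat) (hL2 : 2 ≤ L) (hLn : L ≤ l.length) :
    (PySem.List.pyRange 0 ((l.length : Int) - (L : Int) + 1) 1).foldl
      (fun dp i =>
        if PySem.List.pyGet? l i = PySem.List.pyGet? l (i + (L : Int) - 1) then
          pvSet2 dp i (i + (L : Int) - 1)
            (pvGetI (pvRow dp (i+1)) ((i + (L : Int) - 1) - 1) + 2)
        else
          pvSet2 dp i (i + (L : Int) - 1)
            (max (pvGetI (pvRow dp (i+1)) (i + (L : Int) - 1))
                 (pvGetI (pvRow dp i) ((i + (L : Int) - 1) - 1))))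
      (tabQ l L 0) = tabQ l (L+1) 0 := by
  rw [← tabQ_shift_len l L (by omega) hLn]
  have hcnt : (l.length : Int) - (L : Int) + 1 = (0 : Int) + ((l.length - L + 1 : Nat) : Int) := by
    omega
  rw [hcnt]
  refine foldl_pyRange_from _ (fun i => tabQ l L i) 0 (l.length - L + 1) ?_
  intro i hi
  have e0 : (0 : Int) + (i : Int) = (i : Int) := by omega
  rw [e0]
  exact stepInner l L i hL2 hLn hi

theorem portB_eq (s : String) :
    almostPalindromic_alt s = min ((s.toList.length : Int)) (1 + lpsI s.toList) := by
  simp only [almostPalindromic_alt]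
  generalize s.toList = l
  by_cases hn : (l.length : Int) = 0
  · rw [if_pos hn]
    have hl0 : l = [] := List.length_eq_zero_iff.mp (by exact_mod_cast hn)
    subst hl0
    simp [lpsI_nil]
  · rw [if_neg hn]
    have hpos : 1 ≤ l.length := by omega
    rw [tabQ_init l]
    -- diagonal loop
    have hdiag : (PySem.List.pyRange 0 ((l.length : Int)) 1).foldl
        (fun dp i => pvSet2 dp i i 1) (tabQ l 1 0) = tabQ l 1 l.length := by
      have hcnt : (l.length : Int) = (0 : Int) + ((l.length : Nat) : Int) := by omega
      rw [hcnt]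
      refine foldl_pyRange_from _ (fun i => tabQ l 1 i) 0 l.length ?_
      intro i hi
      have e0 : (0 : Int) + (i : Int) = (i : Int) := by omega
      rw [e0]
      exact stepDiag l i hi
    rw [hdiag, tabQ_shift_diag l]
    -- length loop
    have hlen : (PySem.List.pyRange 2 ((l.length : Int) + 1) 1).foldl
        (fun dp L =>
          (PySem.List.pyRange 0 ((l.length : Int) - L + 1) 1).foldl
            (fun dp i =>
              if PySem.List.pyGet? l i = PySem.List.pyGet? l (i + L - 1) then
                pvSet2 dp i (i + L - 1) (pvGetI (pvRow dp (i+1)) ((i + L - 1) - 1) + 2)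
              else
                pvSet2 dp i (i + L - 1)
                  (max (pvGetI (pvRow dp (i+1)) (i + L - 1))
                       (pvGetI (pvRow dp i) ((i + L - 1) - 1)))) dp)
        (tabQ l 2 0) = tabQ l (2 + (l.length - 1)) 0 := by
      have hcnt : (l.length : Int) + 1 = (2 : Int) + ((l.length - 1 : Nat) : Int) := by omega
      rw [hcnt]
      refine foldl_pyRange_from _ (fun k => tabQ l (2 + k) 0) 2 (l.length - 1) ?_
      · intro k hk
        have eL : (2 : Int) + (k : Int) = ((2 + k : Nat) : Int) := by omega
        rw [eL]
        have := stepOuterQ l (2 + k) (by omega) (by omega)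
        rw [show 2 + k + 1 = 2 + (k + 1) by omega] at this
        exact this
      -- (via the change of state index: tabQ l 2 0 = S 0 and tabQ l (l.length+1) 0 = S (l.length-1))
    rw [show (2 : Nat) + (l.length - 1) = l.length + 1 by omega] at hlen
    rw [hlen]
    have en1 : (l.length : Int) - 1 = ((l.length - 1 : Nat) : Int) := by omega
    rw [show (0 : Int) = ((0 : Nat) : Int) from rfl, en1]
    rw [read_tabQ l (l.length + 1) 0 0 (l.length - 1) (by omega) (by omega)]
    unfold cellQ
    rw [if_pos ⟨by omega, Or.inl (by omega)⟩]
    rw [subL_full l (by intro h; subst h; simp at hn)]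

-- ===== VERDICT (by name: the statement is the Claim_ definition above) =====
theorem almostPalindromic_spec : Claim_equal_almostPalindromic := by
  intro s _
  unfold Spec_almostPalindromic
  rw [portA_eq, portB_eq, lcs_rev_eq_lps]
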